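-- pv_equiv track=rewrite | github.com/cuthbertLab/music21 | music21/common.py | contiguousList
-- ===== SOURCE A (Python) =====
-- def contiguousList(inputListOrTuple):
--     '''
--     returns bool True or False if a list containing ints contains only contiguous (increasing) values
--
--     requires the list to be sorted first
--
--
--     >>> l = [3, 4, 5, 6]
--     >>> common.contiguousList(l)
--     True
--     >>> l.append(8)
--     >>> common.contiguousList(l)
--     False
--
--     Sorting matters
--
--     >>> l.append(7)
--     >>> common.contiguousList(l)
--     False
--     >>> common.contiguousList(sorted(l))
--     True
--     '''
--     currentMaxVal = inputListOrTuple[0]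
--     for i in range(1, len(inputListOrTuple)):
--         newVal = inputListOrTuple[i]
--         if newVal != currentMaxVal + 1:
--             return False
--         currentMaxVal += 1
--     return True
-- ===== SOURCE B (Python) =====
-- def contiguousList(inputListOrTuple):
--     first = inputListOrTuple[0]
--     return list(inputListOrTuple) == list(range(first, first + len(inputListOrTuple)))
-- ===== Notes on version B (the rewrite author's own statement) =====
-- stated objective: simpler
-- what changed: Replaces the index loop with an incrementing accumulator and early return by constructing the expected contiguous range once and returning a single list equality.
import Mathlib
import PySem

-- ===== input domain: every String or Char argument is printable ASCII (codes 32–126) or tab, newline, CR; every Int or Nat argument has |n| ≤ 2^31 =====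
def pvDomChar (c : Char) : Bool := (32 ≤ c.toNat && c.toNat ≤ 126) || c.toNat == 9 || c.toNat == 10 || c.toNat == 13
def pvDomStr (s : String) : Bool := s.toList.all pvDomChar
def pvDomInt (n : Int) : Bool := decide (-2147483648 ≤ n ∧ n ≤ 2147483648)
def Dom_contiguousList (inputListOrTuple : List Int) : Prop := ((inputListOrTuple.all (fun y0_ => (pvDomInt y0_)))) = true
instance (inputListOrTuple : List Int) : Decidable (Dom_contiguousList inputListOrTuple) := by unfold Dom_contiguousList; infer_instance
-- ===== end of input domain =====

-- B replaces A's pairwise increment scan (early-return loop) by building the expected contiguous range once and returning a single list equality (simpler).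


-- ===== PORT A =====
-- the loop 'for i in range(1, len(...))' with early return False
def contiguousListLoop (xs : List Int) (currentMaxVal : Int) (i : Nat) : Bool :=
  if i < xs.length then
    let newVal := xs.getD i 0   -- xs[i], index in range here
    if newVal ≠ currentMaxVal + 1 then false
    else contiguousListLoop xs (currentMaxVal + 1) (i + 1)
  else true
termination_by xs.length - i

-- xs[0]: Python raises IndexError on []; Pre_ excludes the empty list, so getD's default is never used
def contiguousList (inputListOrTuple : List Int) : Bool :=
  contiguousListLoop inputListOrTuple (inputListOrTuple.getD 0 0) 1

-- ===== PORT B =====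
def contiguousList_alt (inputListOrTuple : List Int) : Bool :=
  let first := inputListOrTuple.getD 0 0   -- inputListOrTuple[0]; [] excluded by Pre_
  decide (inputListOrTuple =
    PySem.List.pyRange first (first + inputListOrTuple.length) 1)

-- ===== PRECONDITION & SPEC =====
-- Pre_ excludes only the empty list, on which A (and B alike) raise IndexError at inputListOrTuple[0]
def Pre_contiguousList (inputListOrTuple : List Int) : Prop := inputListOrTuple ≠ []
instance (inputListOrTuple : List Int) : Decidable (Pre_contiguousList inputListOrTuple) := by unfold Pre_contiguousList; infer_instance
def pvWitness_contiguousList : List Int := [3, 4, 5]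

def Spec_contiguousList (inputListOrTuple : List Int) (out : Bool) : Prop := out = contiguousList_alt inputListOrTuple
instance (inputListOrTuple : List Int) (out : Bool) : Decidable (Spec_contiguousList inputListOrTuple out) := by unfold Spec_contiguousList; infer_instance

-- ===== CLAIM (what is proved, stated in full; the proofs are below) =====
def Claim_equal_contiguousList : Prop := ∀ (inputListOrTuple : List Int), Dom_contiguousList inputListOrTuple → Pre_contiguousList inputListOrTuple → Spec_contiguousList inputListOrTuple (contiguousList inputListOrTuple)

-- ===== LEMMAS AND PROOFS =====

-- pure structural version of A's loop: scan the tail, matching cur+1, cur+2, …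
def chain (cur : Int) : List Int → Bool
  | [] => true
  | y :: ys => if y ≠ cur + 1 then false else chain (cur + 1) ys

theorem loop_eq_chain (xs : List Int) (cur : Int) (i : Nat) :
    contiguousListLoop xs cur i = chain cur (xs.drop i) := by
  fun_induction contiguousListLoop xs cur i with
  | case1 cur i h nv hne =>
      rw [List.drop_eq_getElem_cons h, chain]
      have hval : nv = xs[i] := List.getD_eq_getElem xs 0 h
      rw [hval] at hne
      simp [hne]
  | case2 cur i h nv hne ih =>
      rw [List.drop_eq_getElem_cons h, chain]
      have hval : nv = xs[i] := List.getD_eq_getElem xs 0 h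
      rw [hval] at hne
      simp [hne, ih]
  | case3 cur i h =>
      rw [List.drop_eq_nil_of_le (by omega), chain]

theorem chain_eq_range (l : List Int) (cur : Int) :
    chain cur l = decide (l = (List.range l.length).map (fun k : Nat => cur + 1 + (k : Int))) := by
  induction l generalizing cur with
  | nil => simp [chain]
  | cons y ys ih =>
      have hmap : (List.range (ys.length + 1)).map (fun k : Nat => cur + 1 + (k : Int))
          = (cur + 1) :: (List.range ys.length).map (fun k : Nat => (cur + 1) + 1 + (k : Int)) := by
        rw [List.range_succ_eq_map, List.map_cons, List.map_map]
        simp only [Nat.cast_zero, add_zero, List.cons.injEq, true_and]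
        apply List.map_congr_left
        intro k _
        simp only [Function.comp]
        push_cast; ring
      rw [chain, ih (cur + 1), List.length_cons, hmap]
      by_cases hy : y = cur + 1
      · simp [hy]
      · simp [hy]

theorem pyRange_first (x : Int) (n : Nat) :
    PySem.List.pyRange x (x + ((n : Int) + 1)) 1
      = x :: (List.range n).map (fun k : Nat => x + 1 + (k : Int)) := by
  rw [PySem.List.pyRange_one]
  have h1 : (x + ((n : Int) + 1) - x).toNat = n + 1 := by omega
  rw [h1, List.range_succ_eq_map, List.map_cons, List.map_map]
  simp only [Nat.cast_zero, add_zero, List.cons.injEq, true_and]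
  apply List.map_congr_left
  intro k _
  simp only [Function.comp]
  push_cast; ring

-- ===== VERDICT (by name: the statement is the Claim_ definition above) =====
theorem contiguousList_spec : Claim_equal_contiguousList := by
  intro xs _ hpre
  unfold Spec_contiguousList contiguousList contiguousList_alt
  match xs, hpre with
  | x :: rest, _ =>
    simp only [List.getD_cons_zero, List.length_cons]
    rw [loop_eq_chain, List.drop_one, List.tail_cons, chain_eq_range]
    rw [show ((x : Int) + ((rest.length + 1 : Nat) : Int)) = x + (((rest.length : Nat) : Int) + 1) by push_cast; ring]
    rw [pyRange_first x rest.length]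
    simp
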